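-- pv_equiv track=rewrite | github.com/schmerble/adventofcode22 | 3/solution.py | parseString2
-- ===== SOURCE A (Python) =====
-- def parseString2(line1, line2, line3):
--     set1 = set()
--     set2 = set()
--     set3 = set()
--     for char in line1:
--         set1.add(char)
--     for char in line2:
--         set2.add(char)
--     for char in line3:
--         set3.add(char)
--     return set1.intersection(set2, set3)
-- ===== SOURCE B (Python) =====
-- def parseString2(line1, line2, line3):
--     count = {}
--     for line in (line1, line2, line3):
--         for c in dict.fromkeys(line):
--             count[c] = count.get(c, 0) + 1
--     return {c for c, n in count.items() if n == 3}
-- ===== Notes on version B (the rewrite author's own statement) =====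
-- stated objective: alternative
-- what changed: B replaces A's three set builds plus set.intersection with a single counting pass: one dict counts in how many of the three lines each character occurs (incremented once per line over that line's distinct characters), and the answer is the set of characters whose count is 3; no set intersection and no cross-line membership tests occur.
import Mathlib
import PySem

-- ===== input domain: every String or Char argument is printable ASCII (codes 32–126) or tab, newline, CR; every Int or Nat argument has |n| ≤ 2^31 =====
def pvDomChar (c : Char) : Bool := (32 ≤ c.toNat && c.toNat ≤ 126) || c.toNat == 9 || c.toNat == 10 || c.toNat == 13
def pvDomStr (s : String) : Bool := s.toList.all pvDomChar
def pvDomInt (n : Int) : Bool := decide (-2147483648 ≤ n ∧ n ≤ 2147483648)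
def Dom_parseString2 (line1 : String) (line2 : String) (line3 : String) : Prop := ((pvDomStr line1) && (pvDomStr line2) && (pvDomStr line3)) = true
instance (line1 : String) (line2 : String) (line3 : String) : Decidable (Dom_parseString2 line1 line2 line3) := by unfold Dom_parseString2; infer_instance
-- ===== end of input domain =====

-- B replaces A's three set builds + set.intersection by one counting pass (a dict counting
-- per-line distinct occurrences, keeping the chars counted 3 times) — alternative algorithm, same cost.


-- ===== PORT A =====
-- Python iterates over the characters of each string (each char is a 1-char str → String.singleton).
-- set1.intersection(set2, set3) filters set1 by membership in set2 and set3: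
-- PySem.Set.inter (PySem.Set.inter set1 set2) set3 (outputs are compared as finite sets).
def parseString2 (line1 : String) (line2 : String) (line3 : String) : List String :=
  let set1 : PySem.Set String := line1.toList.foldl (fun s c => PySem.Set.add s (String.singleton c)) PySem.Set.empty
  let set2 : PySem.Set String := line2.toList.foldl (fun s c => PySem.Set.add s (String.singleton c)) PySem.Set.empty
  let set3 : PySem.Set String := line3.toList.foldl (fun s c => PySem.Set.add s (String.singleton c)) PySem.Set.empty
  PySem.Set.inter (PySem.Set.inter set1 set2) set3

-- ===== PORT B =====
-- dict.fromkeys(line) = ordered dedup of line's 1-char strings (PySem.List.dedup);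
-- count[c] = count.get(c, 0) + 1 is Dict.insert with Dict.getD; the final set comprehension
-- over count.items keeps the keys whose value is 3.
def parseString2_alt (line1 : String) (line2 : String) (line3 : String) : List String :=
  let count : PySem.Dict String Int :=
    [line1, line2, line3].foldl
      (fun d line =>
        (PySem.List.dedup (line.toList.map String.singleton)).foldl
          (fun d c => PySem.Dict.insert d c (PySem.Dict.getD d c 0 + 1)) d)
      PySem.Dict.empty
  PySem.Set.ofList (((PySem.Dict.items count).filter (fun p => p.2 == 3)).map (·.1))

-- ===== PRECONDITION & SPEC =====
def Spec_parseString2 (line1 : String) (line2 : String) (line3 : String) (out : List String) : Prop := out = parseString2_alt line1 line2 line3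
instance (line1 : String) (line2 : String) (line3 : String) (out : List String) : Decidable (Spec_parseString2 line1 line2 line3 out) := by unfold Spec_parseString2; infer_instance

-- ===== CLAIM (what is proved, stated in full; the proofs are below) =====
def Claim_equal_parseString2 : Prop := ∀ (line1 : String) (line2 : String) (line3 : String), Dom_parseString2 line1 line2 line3 → Spec_parseString2 line1 line2 line3 (parseString2 line1 line2 line3)

-- ===== LEMMAS AND PROOFS =====

-- A's per-line population loop builds set(line) of the singleton characters.
theorem fold_add_eq_ofList (s : String) :
    s.toList.foldl (fun st c => PySem.Set.add st (String.singleton c)) PySem.Set.empty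
      = PySem.Set.ofList (s.toList.map String.singleton) := by
  rw [← PySem.Set.update_map_eq_foldl_add]
  exact PySem.Set.update_nil_left _

-- ===== VERDICT (by name: the statement is the Claim_ definition above) =====
theorem parseString2_spec : Claim_equal_parseString2 := by
  intro line1 line2 line3 _
  unfold Spec_parseString2 parseString2 parseString2_alt
  simp only [fold_add_eq_ofList, PySem.List.dedup_eq_ofList, List.foldl_cons, List.foldl_nil]
  -- abbreviations for the three distinct-character lists
  set L1 := PySem.Set.ofList (line1.toList.map String.singleton) with hL1
  set L2 := PySem.Set.ofList (line2.toList.map String.singleton) with hL2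
  set L3 := PySem.Set.ofList (line3.toList.map String.singleton) with hL3
  have hN1 : L1.Nodup := PySem.Set.nodup_ofList _
  have hN2 : L2.Nodup := PySem.Set.nodup_ofList _
  have hN3 : L3.Nodup := PySem.Set.nodup_ofList _
  -- the counting dict after the three per-line loops
  set cnt : PySem.Dict String Int :=
    L3.foldl (fun d c => PySem.Dict.insert d c (PySem.Dict.getD d c 0 + 1))
      (L2.foldl (fun d c => PySem.Dict.insert d c (PySem.Dict.getD d c 0 + 1))
        (L1.foldl (fun d c => PySem.Dict.insert d c (PySem.Dict.getD d c 0 + 1))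
          PySem.Dict.empty)) with hcnt
  have hself : ∀ (L : List String), L.Nodup → PySem.Set.ofList L = L := fun L h =>
    PySem.Set.ofList_eq_self_of_nodup L h
  -- final count of each key
  have hg : ∀ k, PySem.Dict.getD cnt k 0
      = (L1.count k : Int) + (L2.count k : Int) + (L3.count k : Int) := by
    intro k
    rw [PySem.Dict.getD_foldl_insert_add_one, PySem.Dict.getD_foldl_insert_add_one,
        PySem.Dict.getD_foldl_insert_add_one, PySem.Dict.getD_empty]
    ring
  -- keys of the dict, in insertion order
  have hkeys : cnt.keys = PySem.Set.update (PySem.Set.update L1 L2) L3 := by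
    rw [PySem.Dict.keys_foldl_insert, PySem.Dict.keys_foldl_insert,
        PySem.Dict.keys_foldl_insert, PySem.Dict.keys_empty, PySem.Set.update_nil_left,
        hself L1 hN1]
  have hkN : cnt.keys.Nodup := by
    rw [hkeys]; exact PySem.Set.nodup_update _ _ (PySem.Set.nodup_update _ _ hN1)
  -- B's comprehension = the keys whose count is 3
  have hB : PySem.Set.ofList (((PySem.Dict.items cnt).filter (fun p => p.2 == 3)).map (·.1))
      = cnt.keys.filter (fun k => PySem.Dict.getD cnt k 0 == 3) := by
    rw [PySem.Dict.items_eq_map_keys cnt hkN 0, List.filter_map, List.map_map]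
    have : ((fun p : String × Int => p.1) ∘ fun k => (k, PySem.Dict.getD cnt k 0)) = id := rfl
    rw [this, List.map_id]
    exact PySem.Set.ofList_eq_self_of_nodup _ (List.Nodup.filter _ hkN)
  rw [hB, hkeys]
  -- keys first seen in line2 are not in line1: their count is at most 2
  have h2 : (((PySem.Set.ofList L2).filter fun y => !L1.contains y).filter
      fun k => PySem.Dict.getD cnt k 0 == 3) = [] := by
    rw [List.filter_eq_nil_iff]
    intro a ha
    rw [List.mem_filter] at ha
    have ha1 : a ∉ L1 := by simpa using ha.2
    have hc1 : L1.count a = 0 := List.count_eq_zero.mpr ha1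
    have hc2 : L2.count a ≤ 1 := List.nodup_iff_count_le_one.mp hN2 a
    have hc3 : L3.count a ≤ 1 := List.nodup_iff_count_le_one.mp hN3 a
    simp only [hg, hc1, beq_iff_eq]
    push_cast
    omega
  -- keys first seen in line3 are in neither line1 nor line2: their count is at most 1
  have h3 : (((PySem.Set.ofList L3).filter fun y => !(PySem.Set.update L1 L2).contains y).filter
      fun k => PySem.Dict.getD cnt k 0 == 3) = [] := by
    rw [List.filter_eq_nil_iff]
    intro a ha
    rw [List.mem_filter] at ha
    have ha12' : a ∉ PySem.Set.update L1 L2 := by simpa using ha.2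
    rw [PySem.Set.mem_update] at ha12'
    have ha12 : a ∉ L1 ∧ a ∉ L2 := by tauto
    have hc1 : L1.count a = 0 := List.count_eq_zero.mpr ha12.1
    have hc2 : L2.count a = 0 := List.count_eq_zero.mpr ha12.2
    have hc3 : L3.count a ≤ 1 := List.nodup_iff_count_le_one.mp hN3 a
    simp only [hg, hc1, hc2, beq_iff_eq]
    push_cast
    omega
  rw [PySem.Set.update_eq_append_filter (PySem.Set.update L1 L2) L3, List.filter_append, h3,
      List.append_nil, PySem.Set.update_eq_append_filter L1 L2, List.filter_append, h2,
      List.append_nil]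
  -- on L1 itself, count = 3 exactly when the key is in line2 and line3 as well
  show PySem.Set.inter (PySem.Set.inter L1 L2) L3 = _
  simp only [PySem.Set.inter]
  rw [List.filter_filter]
  apply List.filter_congr
  intro x hx
  have hc1 : L1.count x = 1 := List.count_eq_one_of_mem hN1 hx
  simp only [hg, hc1]
  by_cases h2m : x ∈ L2 <;> by_cases h3m : x ∈ L3
  · have e2 := List.count_eq_one_of_mem hN2 h2m
    have e3 := List.count_eq_one_of_mem hN3 h3m
    have cb2 : L2.contains x = true := by simpa using h2m
    have cb3 : L3.contains x = true := by simpa using h3m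
    rw [e2, e3, cb2, cb3]
    norm_num
  · have e2 := List.count_eq_one_of_mem hN2 h2m
    have e3 := List.count_eq_zero.mpr h3m
    have hcb : L3.contains x = false := by simpa using h3m
    rw [e2, e3, hcb]
    norm_num
  · have e2 := List.count_eq_zero.mpr h2m
    have e3 := List.count_eq_one_of_mem hN3 h3m
    have hcb : L2.contains x = false := by simpa using h2m
    rw [e2, e3, hcb]
    norm_num
  · have e2 := List.count_eq_zero.mpr h2m
    have e3 := List.count_eq_zero.mpr h3m
    have hcb : L2.contains x = false := by simpa using h2m
    rw [e2, e3, hcb]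
    norm_num
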